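-- pv_equiv track=rewrite | github.com/SteveWufeng/Advent_coding_challenge | q5.py | read_cordinate_only_horizontal_vertical
-- ===== SOURCE A (Python) =====
-- def read_cordinate_only_horizontal_vertical(x1, y1, x2, y2) -> set:
--     """return a list of cordinate from point 1 to point2"""
--     change_y = False
--     change_x = False
--     # check which one is changing
--     if x1 == x2:
--         changing = [y1, y2]
--         change_y = True
--     elif y1 == y2:
--         changing = [x1, x2]
--         change_x = True
--     else:
--         return
--     # start adding the cordinates
--     set_of_cord = set()
--     # check which one is bigger
--     if changing[0] > changing[1]:
--         changing[0], changing[1] = changing[1], changing[0]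
--     # add the cordinates
--     for i in range(changing[0], changing[1]+1):
--         if change_x:
--             set_of_cord.add((i, y1))
--         elif change_y:
--             set_of_cord.add((x1, i))
--     return set_of_cord
-- ===== SOURCE B (Python) =====
-- def read_cordinate_only_horizontal_vertical(x1, y1, x2, y2) -> set:
--     """return a list of cordinate from point 1 to point2"""
--     if x1 != x2 and y1 != y2:
--         return None
--     # one axis is degenerate, so the bounding box IS the segment
--     return {(x, y)
--             for x in range(min(x1, x2), max(x1, x2) + 1)
--             for y in range(min(y1, y2), max(y1, y2) + 1)}
-- ===== Notes on version B (the rewrite author's own statement) =====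
-- stated objective: simpler
-- what changed: B drops A's change_x/change_y flags, the changing-list selection and the endpoint swap, and instead enumerates the bounding box of the two points with one min/max comprehension (the box equals the segment since one axis is degenerate).
import Mathlib
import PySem

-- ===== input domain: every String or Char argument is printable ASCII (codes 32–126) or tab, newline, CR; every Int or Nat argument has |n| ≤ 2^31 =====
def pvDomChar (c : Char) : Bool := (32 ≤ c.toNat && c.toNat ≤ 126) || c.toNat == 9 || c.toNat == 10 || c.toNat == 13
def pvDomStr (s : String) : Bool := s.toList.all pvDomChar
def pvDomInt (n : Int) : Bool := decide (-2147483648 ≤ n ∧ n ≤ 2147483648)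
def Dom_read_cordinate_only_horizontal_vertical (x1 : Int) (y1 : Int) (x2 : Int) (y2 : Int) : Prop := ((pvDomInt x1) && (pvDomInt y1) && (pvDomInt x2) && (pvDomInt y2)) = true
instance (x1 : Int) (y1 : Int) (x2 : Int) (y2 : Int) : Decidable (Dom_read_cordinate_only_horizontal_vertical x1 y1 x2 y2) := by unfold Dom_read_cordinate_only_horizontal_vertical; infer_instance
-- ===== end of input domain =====

-- B replaces A's change_x/change_y flag machinery and endpoint swap with a single
-- min/max bounding-box enumeration (objective: simpler).


-- ===== PORT A =====
-- the loop of A: swap changing[0]/changing[1] if needed, then fold range adding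
-- (i, y1) when change_x else (x1, i) when change_y
def pvLoopA (x1 y1 : Int) (change_x change_y : Bool) (c0 c1 : Int) : List (Int × Int) :=
  let p := if c0 > c1 then (c1, c0) else (c0, c1)
  (PySem.List.pyRange p.1 (p.2 + 1) 1).foldl
    (fun s i =>
      if change_x then PySem.Set.add s (i, y1)
      else if change_y then PySem.Set.add s (x1, i)
      else s)
    PySem.Set.empty

def read_cordinate_only_horizontal_vertical (x1 : Int) (y1 : Int) (x2 : Int) (y2 : Int) : Option (List (Int × Int)) :=
  if x1 = x2 then some (pvLoopA x1 y1 false true y1 y2)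
  else if y1 = y2 then some (pvLoopA x1 y1 true false x1 x2)
  else none

-- ===== PORT B =====
def read_cordinate_only_horizontal_vertical_alt (x1 : Int) (y1 : Int) (x2 : Int) (y2 : Int) : Option (List (Int × Int)) :=
  if x1 ≠ x2 ∧ y1 ≠ y2 then none
  else some ((PySem.List.pyRange (min x1 x2) (max x1 x2 + 1) 1).foldl
    (fun s x => (PySem.List.pyRange (min y1 y2) (max y1 y2 + 1) 1).foldl
      (fun s y => PySem.Set.add s (x, y)) s)
    PySem.Set.empty)

-- ===== PRECONDITION & SPEC =====
def Spec_read_cordinate_only_horizontal_vertical (x1 : Int) (y1 : Int) (x2 : Int) (y2 : Int) (out : Option (List (Int × Int))) : Prop := out = read_cordinate_only_horizontal_vertical_alt x1 y1 x2 y2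
instance (x1 : Int) (y1 : Int) (x2 : Int) (y2 : Int) (out : Option (List (Int × Int))) : Decidable (Spec_read_cordinate_only_horizontal_vertical x1 y1 x2 y2 out) := by unfold Spec_read_cordinate_only_horizontal_vertical; infer_instance

-- ===== CLAIM (what is proved, stated in full; the proofs are below) =====
def Claim_equal_read_cordinate_only_horizontal_vertical : Prop := ∀ (x1 : Int) (y1 : Int) (x2 : Int) (y2 : Int), Dom_read_cordinate_only_horizontal_vertical x1 y1 x2 y2 → Spec_read_cordinate_only_horizontal_vertical x1 y1 x2 y2 (read_cordinate_only_horizontal_vertical x1 y1 x2 y2)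

-- ===== LEMMAS AND PROOFS =====
theorem pvSwap_eq_minmax (a b : Int) :
    (if a > b then (b, a) else (a, b)) = (min a b, max a b) := by
  split <;> simp_all [min_def, max_def]

-- ===== VERDICT (by name: the statement is the Claim_ definition above) =====
theorem read_cordinate_only_horizontal_vertical_spec : Claim_equal_read_cordinate_only_horizontal_vertical := by
  intro x1 y1 x2 y2 _
  unfold Spec_read_cordinate_only_horizontal_vertical
  unfold read_cordinate_only_horizontal_vertical read_cordinate_only_horizontal_vertical_alt pvLoopA
  by_cases hx : x1 = x2
  · subst hx
    by_cases hy : y1 = y2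
    · subst hy
      simp [PySem.List.pyRange_one_singleton, List.foldl]
    · simp [hy, pvSwap_eq_minmax, PySem.List.pyRange_one_singleton, List.foldl]
  · by_cases hy : y1 = y2
    · subst hy
      simp [hx, pvSwap_eq_minmax, PySem.List.pyRange_one_singleton, List.foldl]
    · simp [hx, hy]
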